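-- pv_equiv track=rewrite | github.com/Melbeck777/usually_zemi | material/create_summary/create_summary.py | count_tab
-- ===== SOURCE A (Python) =====
-- def count_tab(str):
--     cnt = 0
--     if len(str) == 0:
--         return cnt
--     flag = True
--     while(flag and cnt < len(str)):
--         if str[cnt] == '\t':
--             cnt += 1
--         else:
--             flag = False
--     return cnt
-- ===== SOURCE B (Python) =====
-- def count_tab(str):
--     return len(str) - len(str.lstrip('\t'))
-- ===== Notes on version B (the rewrite author's own statement) =====
-- stated objective: idiomatic
-- what changed: Replaces the index/flag while-loop that maintains a counter with a whole-string lstrip of tab characters followed by a length difference.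
import Mathlib
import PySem

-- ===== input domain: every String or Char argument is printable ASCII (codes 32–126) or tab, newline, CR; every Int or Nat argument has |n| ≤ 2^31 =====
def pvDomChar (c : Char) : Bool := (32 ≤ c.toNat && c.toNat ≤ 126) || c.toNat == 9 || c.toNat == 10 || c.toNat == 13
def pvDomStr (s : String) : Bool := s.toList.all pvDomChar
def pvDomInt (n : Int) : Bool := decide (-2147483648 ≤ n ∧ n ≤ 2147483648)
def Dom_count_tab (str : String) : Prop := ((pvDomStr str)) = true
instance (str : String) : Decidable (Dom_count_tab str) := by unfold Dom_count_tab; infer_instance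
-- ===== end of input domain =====

-- B replaces A's index/flag while-loop with a tab-lstrip and a length difference (idiomatic).

-- ===== PORT A =====
-- the while(flag and cnt < len(str)) loop, step for step
def count_tab_go (s : List Char) (flag : Bool) (cnt : Nat) : Nat :=
  if h : flag ∧ cnt < s.length then
    if PySem.List.pyGet? s (cnt : Int) = some '\t' then
      count_tab_go s flag (cnt + 1)
    else
      count_tab_go s false cnt
  else cnt
termination_by (s.length - cnt, if flag then 1 else 0)
decreasing_by
  · exact Prod.Lex.left _ _ (by omega)
  · have hf : flag = true := h.1
    subst hf
    exact Prod.Lex.right' _ (le_refl _) (by simp)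

def count_tab (str : String) : Int :=
  let cnt : Nat := 0
  if str.toList.length = 0 then (cnt : Int)
  else (count_tab_go str.toList true cnt : Int)

-- ===== PORT B =====
-- Python's lstrip of tabs ported by hand as dropWhile of tab characters (exact: the
-- char set is the single tab character); then len(str) - len(stripped).
def count_tab_alt (str : String) : Int :=
  (str.toList.length : Int) - ((str.toList.dropWhile (fun c => c == '\t')).length : Int)

-- ===== PRECONDITION & SPEC =====
def Spec_count_tab (str : String) (out : Int) : Prop := out = count_tab_alt str
instance (str : String) (out : Int) : Decidable (Spec_count_tab str out) := by unfold Spec_count_tab; infer_instance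

-- ===== CLAIM (what is proved, stated in full; the proofs are below) =====
def Claim_equal_count_tab : Prop := ∀ (str : String), Dom_count_tab str → Spec_count_tab str (count_tab str)

-- ===== LEMMAS AND PROOFS =====

-- a finished loop (flag = False) returns cnt unchanged
theorem count_tab_go_false (s : List Char) (cnt : Nat) :
    count_tab_go s false cnt = cnt := by
  unfold count_tab_go
  simp

-- the running loop counts the leading tabs of the remaining suffix
theorem count_tab_go_true (s : List Char) (cnt : Nat) (h : cnt ≤ s.length) :
    count_tab_go s true cnt = cnt + ((s.drop cnt).takeWhile (fun c => c == '\t')).length := by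
  by_cases hlt : cnt < s.length
  · have hdrop : s.drop cnt = s[cnt] :: s.drop (cnt + 1) := List.drop_eq_getElem_cons hlt
    unfold count_tab_go
    rw [dif_pos ⟨rfl, hlt⟩]
    by_cases htab : s[cnt] = '\t'
    · rw [if_pos (by simp [PySem.List.pyGet?_natCast, List.getElem?_eq_getElem hlt, htab])]
      rw [count_tab_go_true s (cnt + 1) (by omega), hdrop]
      simp [htab]
      omega
    · rw [if_neg (by simp [PySem.List.pyGet?_natCast, List.getElem?_eq_getElem hlt]; exact htab)]
      rw [count_tab_go_false, hdrop]
      simp [htab]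
  · have hcnt : cnt = s.length := by omega
    unfold count_tab_go
    rw [dif_neg (by omega)]
    simp [hcnt]
termination_by s.length - cnt

-- B equals the number of leading tabs
theorem alt_eq_takeWhile (s : List Char) :
    (s.length : Int) - ((s.dropWhile (fun c => c == '\t')).length : Int)
      = ((s.takeWhile (fun c => c == '\t')).length : Int) := by
  have := List.takeWhile_append_dropWhile (p := fun c => c == '\t') (l := s)
  have hlen : (s.takeWhile (fun c => c == '\t')).length
      + (s.dropWhile (fun c => c == '\t')).length = s.length := by
    conv_rhs => rw [← this]
    exact (List.length_append ..).symm
  omega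

-- ===== VERDICT (by name: the statement is the Claim_ definition above) =====
theorem count_tab_spec : Claim_equal_count_tab := by
  intro str _
  show count_tab str = count_tab_alt str
  unfold count_tab count_tab_alt
  by_cases h : str.toList.length = 0
  · simp [List.eq_nil_of_length_eq_zero h]
  · rw [if_neg h, alt_eq_takeWhile, count_tab_go_true str.toList 0 (by omega)]
    simp
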